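-- pv_equiv track=rewrite | github.com/adhnanjeff/projectfolio | SDV & CyberSecurity/ids.py | _check_burst_pattern
-- ===== SOURCE A (Python) =====
-- def _check_burst_pattern(msgs):
--     """Check for burst patterns (Replay indicator)"""
--     if len(msgs) < 10:
--         return False
--
--     # Check for repeated sequences
--     for i in range(len(msgs) - 5):
--         sequence = msgs[i:i+3]
--         for j in range(i+3, len(msgs) - 2):
--             if msgs[j:j+3] == sequence:
--                 return True
--     return False
-- ===== SOURCE B (Python) =====
-- def _check_burst_pattern(msgs):
--     """Check for burst patterns (Replay indicator)"""
--     n = len(msgs)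
--     if n < 10:
--         return False
--     seen = set()
--     for j in range(3, n - 2):
--         seen.add(tuple(msgs[j-3:j]))
--         if tuple(msgs[j:j+3]) in seen:
--             return True
--     return False
-- ===== Notes on version B (the rewrite author's own statement) =====
-- stated objective: faster
-- what changed: Replaced the nested quadratic scan (for each start i, rescan all later j for an equal 3-slice) by a single pass that keeps a hash set of the triples seen 3 positions behind and tests the current triple against it.
import Mathlib
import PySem

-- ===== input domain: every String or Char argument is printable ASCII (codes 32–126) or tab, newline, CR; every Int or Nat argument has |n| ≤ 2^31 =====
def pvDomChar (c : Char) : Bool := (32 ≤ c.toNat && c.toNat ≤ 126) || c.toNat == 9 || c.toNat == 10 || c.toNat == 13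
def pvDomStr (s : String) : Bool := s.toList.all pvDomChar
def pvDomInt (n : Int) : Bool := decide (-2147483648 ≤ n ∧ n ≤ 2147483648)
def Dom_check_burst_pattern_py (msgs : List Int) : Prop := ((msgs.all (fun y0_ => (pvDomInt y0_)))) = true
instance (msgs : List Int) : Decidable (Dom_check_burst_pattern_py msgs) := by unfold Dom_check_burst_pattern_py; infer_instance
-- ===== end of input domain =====

-- B replaces A's O(n^2) nested rescan by one pass keeping a set of the triples seen 3 positions behind (objective: faster, asymptotic).

-- ===== PORT A =====
def check_burst_pattern_py (msgs : List Int) : Bool :=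
  if msgs.length < 10 then false
  else
    (PySem.List.pyRange 0 ((msgs.length : Int) - 5) 1).any (fun i =>
      let sequence := PySem.List.slice msgs (some i) (some (i + 3))
      (PySem.List.pyRange (i + 3) ((msgs.length : Int) - 2) 1).any (fun j =>
        PySem.List.slice msgs (some j) (some (j + 3)) == sequence))

-- ===== PORT B =====
def burstLoop (msgs : List Int) : List Int → PySem.Set (List Int) → Bool
  | [], _ => false
  | j :: js, seen =>
    let seen' := PySem.Set.add seen (PySem.List.slice msgs (some (j - 3)) (some j))
    if PySem.Set.contains seen' (PySem.List.slice msgs (some j) (some (j + 3))) then true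
    else burstLoop msgs js seen'

def check_burst_pattern_py_alt (msgs : List Int) : Bool :=
  if msgs.length < 10 then false
  else burstLoop msgs (PySem.List.pyRange 3 ((msgs.length : Int) - 2) 1) PySem.Set.empty

-- ===== PRECONDITION & SPEC =====
def Spec_check_burst_pattern_py (msgs : List Int) (out : Bool) : Prop := out = check_burst_pattern_py_alt msgs
instance (msgs : List Int) (out : Bool) : Decidable (Spec_check_burst_pattern_py msgs out) := by unfold Spec_check_burst_pattern_py; infer_instance

-- ===== CLAIM (what is proved, stated in full; the proofs are below) =====
def Claim_equal_check_burst_pattern_py : Prop := ∀ (msgs : List Int), Dom_check_burst_pattern_py msgs → Spec_check_burst_pattern_py msgs (check_burst_pattern_py msgs)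

-- ===== LEMMAS AND PROOFS =====

-- the triple starting at index k
def pvTri (msgs : List Int) (k : Nat) : List Int := (msgs.drop k).take 3

-- the common characterisation both programs are proved equivalent to
def pvP (msgs : List Int) : Prop :=
  ∃ a b : Nat, a + 3 ≤ b ∧ b + 3 ≤ msgs.length ∧ pvTri msgs a = pvTri msgs b

lemma slice_tri (msgs : List Int) (a : Nat) :
    PySem.List.slice msgs (some (a : Int)) (some ((a : Int) + 3)) = pvTri msgs a := by
  have h3 : ((a : Int) + 3) = ((a + 3 : Nat) : Int) := by push_cast; ring
  rw [h3, PySem.List.slice_natCast, pvTri]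
  congr 1
  omega

lemma A_iff (msgs : List Int) (hn : ¬ msgs.length < 10) :
    check_burst_pattern_py msgs = true ↔ pvP msgs := by
  unfold check_burst_pattern_py
  simp only [if_neg hn, List.any_eq_true, PySem.List.mem_pyRange_one, beq_iff_eq]
  constructor
  · rintro ⟨i, ⟨hi0, hi1⟩, j, ⟨hj0, hj1⟩, hEq⟩
    have hj0' : (0:Int) ≤ j := by omega
    refine ⟨i.toNat, j.toNat, by omega, by omega, ?_⟩
    rw [← slice_tri, ← slice_tri]
    rw [Int.toNat_of_nonneg hi0, Int.toNat_of_nonneg hj0']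
    exact hEq.symm
  · rintro ⟨a, b, hab, hbn, hEq⟩
    refine ⟨(a : Int), ⟨by omega, by omega⟩, (b : Int), ⟨by omega, by omega⟩, ?_⟩
    rw [slice_tri, slice_tri]
    exact hEq.symm

lemma burst_iff (msgs : List Int) (m : Nat) :
    ∀ (fuel t : Nat) (seen : PySem.Set (List Int)), 3 ≤ t → m ≤ t + fuel →
    (burstLoop msgs (PySem.List.pyRange (t : Int) (m : Int) 1) seen = true ↔
      ∃ b : Nat, t ≤ b ∧ b < m ∧
        (pvTri msgs b ∈ seen ∨ ∃ a : Nat, a + 3 ≤ b ∧ t ≤ a + 3 ∧ pvTri msgs a = pvTri msgs b)) := by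
  intro fuel
  induction fuel with
  | zero =>
    intro t seen ht hm
    rw [PySem.List.pyRange_one_eq_nil (by exact_mod_cast hm)]
    simp only [burstLoop]
    constructor
    · intro h; exact absurd h (by simp)
    · rintro ⟨b, hb0, hb1, _⟩; omega
  | succ fuel ih =>
    intro t seen ht hm
    by_cases htm : t < m
    · rw [PySem.List.pyRange_one_cons (by exact_mod_cast htm)]
      have hcast : ((t : Int) + 1) = ((t + 1 : Nat) : Int) := by push_cast; ring
      have htri : PySem.List.slice msgs (some ((t : Int) - 3)) (some (t : Int)) = pvTri msgs (t - 3) := by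
        have h1 : ((t : Int) - 3) = ((t - 3 : Nat) : Int) := by omega
        have h2 : (t : Int) = ((t - 3 : Nat) : Int) + 3 := by omega
        rw [h1, h2, slice_tri]
      simp only [burstLoop, htri, hcast, slice_tri]
      by_cases hc : PySem.Set.contains (PySem.Set.add seen (pvTri msgs (t - 3))) (pvTri msgs t) = true
      · simp only [hc, if_true]
        have hc' : pvTri msgs t ∈ seen ∨ pvTri msgs (t - 3) = pvTri msgs t := by
          have := (PySem.Set.mem_add seen (pvTri msgs (t - 3)) (pvTri msgs t)).1
            (by simpa [PySem.Set.contains] using hc)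
          tauto
        constructor
        · intro _
          rcases hc' with h | h
          · exact ⟨t, le_refl t, htm, Or.inl h⟩
          · exact ⟨t, le_refl t, htm, Or.inr ⟨t - 3, by omega, by omega, h⟩⟩
        · intro _; trivial
      · simp only [hc, Bool.false_eq_true, if_false]
        rw [ih (t + 1) _ (by omega) (by omega)]
        constructor
        · rintro ⟨b, hb0, hb1, hmem | ⟨a, ha0, ha1, haeq⟩⟩
          · rcases (PySem.Set.mem_add _ _ _).1 hmem with h | h
            · exact ⟨b, by omega, hb1, Or.inl h⟩
            · exact ⟨b, by omega, hb1, Or.inr ⟨t - 3, by omega, by omega, by rw [← h]⟩⟩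
          · exact ⟨b, by omega, hb1, Or.inr ⟨a, ha0, by omega, haeq⟩⟩
        · rintro ⟨b, hb0, hb1, hmem | ⟨a, ha0, ha1, haeq⟩⟩
          · by_cases hbt : b = t
            · exfalso; apply hc
              simp only [PySem.Set.contains]
              have : pvTri msgs t ∈ PySem.Set.add seen (pvTri msgs (t - 3)) :=
                (PySem.Set.mem_add _ _ _).2 (Or.inl (hbt ▸ hmem))
              simpa using this
            · exact ⟨b, by omega, hb1, Or.inl ((PySem.Set.mem_add _ _ _).2 (Or.inl hmem))⟩
          · by_cases hbt : b = t
            · -- then a = t - 3 and the contains test would have fired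
              exfalso; apply hc
              have haeq' : a = t - 3 := by omega
              simp only [PySem.Set.contains]
              have : pvTri msgs t ∈ PySem.Set.add seen (pvTri msgs (t - 3)) :=
                (PySem.Set.mem_add _ _ _).2 (Or.inr (by rw [← haeq', haeq, hbt]))
              simpa using this
            · by_cases hat : t + 1 ≤ a + 3
              · exact ⟨b, by omega, hb1, Or.inr ⟨a, ha0, hat, haeq⟩⟩
              · -- a + 3 = t: the triple at a = t - 3 is in the freshly grown set
                have haeq' : a = t - 3 := by omega
                exact ⟨b, by omega, hb1,
                  Or.inl ((PySem.Set.mem_add _ _ _).2 (Or.inr (by rw [← haeq, haeq'])))⟩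
    · rw [PySem.List.pyRange_one_eq_nil (by exact_mod_cast (by omega : m ≤ t))]
      simp only [burstLoop]
      constructor
      · intro h; exact absurd h (by simp)
      · rintro ⟨b, hb0, hb1, _⟩; omega

lemma B_iff (msgs : List Int) (hn : ¬ msgs.length < 10) :
    check_burst_pattern_py_alt msgs = true ↔ pvP msgs := by
  unfold check_burst_pattern_py_alt
  rw [if_neg hn]
  have hcast : ((msgs.length : Int) - 2) = ((msgs.length - 2 : Nat) : Int) := by omega
  have h3 : (3 : Int) = ((3 : Nat) : Int) := by norm_num
  rw [hcast, h3, burst_iff msgs (msgs.length - 2) (msgs.length) 3 PySem.Set.empty (by omega) (by omega)]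
  constructor
  · rintro ⟨b, hb0, hb1, hmem | ⟨a, ha0, _, haeq⟩⟩
    · exact absurd hmem (by simp [PySem.Set.empty])
    · exact ⟨a, b, ha0, by omega, haeq⟩
  · rintro ⟨a, b, hab, hbn, haeq⟩
    exact ⟨b, by omega, by omega, Or.inr ⟨a, hab, by omega, haeq⟩⟩

-- ===== VERDICT (by name: the statement is the Claim_ definition above) =====
theorem check_burst_pattern_py_spec : Claim_equal_check_burst_pattern_py := by
  intro msgs _
  unfold Spec_check_burst_pattern_py
  by_cases hn : msgs.length < 10
  · unfold check_burst_pattern_py check_burst_pattern_py_alt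
    rw [if_pos hn, if_pos hn]
  · have hA := A_iff msgs hn
    have hB := B_iff msgs hn
    cases hA' : check_burst_pattern_py msgs
    · cases hB' : check_burst_pattern_py_alt msgs
      · rfl
      · exact absurd (hA.2 (hB.1 hB')) (by simp [hA'])
    · exact (hB.2 (hA.1 hA')).symm
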